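-- pv_equiv track=rewrite | github.com/mobarski/sandbox | topic/context.py | get_context1
-- ===== SOURCE A (Python) =====
-- def get_context1(tokens):
-- 	before = {}
-- 	after = {}
-- 	tf = {}
-- 	for b,t,a in zip(['']+tokens,tokens,tokens[1:]+['']):
-- 		if t not in tf:
-- 			tf[t]=0
-- 			before[t]={}
-- 			after[t]={}
-- 		tf[t] += 1
-- 		if b: before[t][b] = before[t].get(b,0)+1
-- 		if a: after[t][a] = after[t].get(a,0)+1
-- 	return tf,before,after
-- ===== SOURCE B (Python) =====
-- def get_context1(tokens):
--     tf = {}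
--     before = {}
--     after = {}
--     for t in tokens:
--         if t not in tf:
--             tf[t] = 0
--             before[t] = {}
--             after[t] = {}
--         tf[t] += 1
--     for p, c in zip(tokens, tokens[1:]):
--         if c:
--             after[p][c] = after[p].get(c, 0) + 1
--         if p:
--             before[c][p] = before[c].get(p, 0) + 1
--     return tf, before, after
-- ===== Notes on version B (the rewrite author's own statement) =====
-- stated objective: simpler
-- what changed: Replaces A's single sentinel-padded triple-zip pass with two plain passes: one over tokens building tf and initializing the neighbor dicts, then one over real adjacent pairs incrementing after[prev][cur] and before[cur][prev], dropping the sentinel-padding trick.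
import Mathlib
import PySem

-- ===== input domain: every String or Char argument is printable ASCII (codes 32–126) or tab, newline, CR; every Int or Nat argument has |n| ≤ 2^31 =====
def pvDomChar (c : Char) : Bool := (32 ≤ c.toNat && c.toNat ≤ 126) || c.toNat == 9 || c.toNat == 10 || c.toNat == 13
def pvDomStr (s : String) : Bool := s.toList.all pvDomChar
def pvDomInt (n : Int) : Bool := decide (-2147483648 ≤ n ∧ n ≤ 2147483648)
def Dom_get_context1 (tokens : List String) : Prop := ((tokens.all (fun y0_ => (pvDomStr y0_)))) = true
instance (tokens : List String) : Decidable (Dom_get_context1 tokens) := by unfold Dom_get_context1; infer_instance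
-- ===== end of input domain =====

-- B replaces A's single sentinel-padded triple-zip pass by a tf/init pass plus an adjacent-pair pass (simpler; same O(n) cost).

-- the loop state both Pythons carry: (tf, before, after)
abbrev pvSt : Type :=
  PySem.Dict String Int × PySem.Dict String (PySem.Dict String Int) × PySem.Dict String (PySem.Dict String Int)

-- ===== PORT A =====
-- loop body of A, one step for (b, t, a)
def pvStepA (s : pvSt) (bta : String × String × String) : pvSt :=
  let b := bta.1
  let t := bta.2.1
  let a := bta.2.2
  -- if t not in tf: tf[t]=0; before[t]={}; after[t]={}
  let s :=
    if s.1.contains t then s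
    else (s.1.insert t 0, s.2.1.insert t PySem.Dict.empty, s.2.2.insert t PySem.Dict.empty)
  -- tf[t] += 1
  let tf := s.1.insert t (s.1.getD t 0 + 1)
  -- if b: before[t][b] = before[t].get(b,0)+1
  let before :=
    if b = "" then s.2.1
    else s.2.1.insert t ((s.2.1.getD t PySem.Dict.empty).insert b ((s.2.1.getD t PySem.Dict.empty).getD b 0 + 1))
  -- if a: after[t][a] = after[t].get(a,0)+1
  let after :=
    if a = "" then s.2.2
    else s.2.2.insert t ((s.2.2.getD t PySem.Dict.empty).insert a ((s.2.2.getD t PySem.Dict.empty).getD a 0 + 1))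
  (tf, before, after)

def get_context1 (tokens : List String) :
    (List (String × Int)) × (List (String × List (String × Int))) × (List (String × List (String × Int))) :=
  -- for b,t,a in zip(['']+tokens, tokens, tokens[1:]+['']):
  let s := (List.zip ([""] ++ tokens) (List.zip tokens (PySem.List.slice tokens (some 1) none ++ [""]))).foldl
             pvStepA (PySem.Dict.empty, PySem.Dict.empty, PySem.Dict.empty)
  (s.1.items, s.2.1.items.map (fun p => (p.1, p.2.items)), s.2.2.items.map (fun p => (p.1, p.2.items)))

-- ===== PORT B =====
-- first loop of B: tf counting and dict initialisation
def pvStepTF (s : pvSt) (t : String) : pvSt :=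
  let s :=
    if s.1.contains t then s
    else (s.1.insert t 0, s.2.1.insert t PySem.Dict.empty, s.2.2.insert t PySem.Dict.empty)
  (s.1.insert t (s.1.getD t 0 + 1), s.2.1, s.2.2)

-- second loop of B, one step for an adjacent pair (p, c)
def pvStepPair (s : pvSt) (pc : String × String) : pvSt :=
  let p := pc.1
  let c := pc.2
  -- if c: after[p][c] = after[p].get(c,0)+1
  let after :=
    if c = "" then s.2.2
    else s.2.2.insert p ((s.2.2.getD p PySem.Dict.empty).insert c ((s.2.2.getD p PySem.Dict.empty).getD c 0 + 1))
  -- if p: before[c][p] = before[c].get(p,0)+1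
  let before :=
    if p = "" then s.2.1
    else s.2.1.insert c ((s.2.1.getD c PySem.Dict.empty).insert p ((s.2.1.getD c PySem.Dict.empty).getD p 0 + 1))
  (s.1, before, after)

def get_context1_alt (tokens : List String) :
    (List (String × Int)) × (List (String × List (String × Int))) × (List (String × List (String × Int))) :=
  let s1 := tokens.foldl pvStepTF (PySem.Dict.empty, PySem.Dict.empty, PySem.Dict.empty)
  -- for p,c in zip(tokens, tokens[1:]):
  let s2 := (List.zip tokens (PySem.List.slice tokens (some 1) none)).foldl pvStepPair s1
  (s2.1.items, s2.2.1.items.map (fun p => (p.1, p.2.items)), s2.2.2.items.map (fun p => (p.1, p.2.items)))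

-- ===== PRECONDITION & SPEC =====
def Spec_get_context1 (tokens : List String) (out : (List (String × Int)) × (List (String × List (String × Int))) × (List (String × List (String × Int)))) : Prop := out = get_context1_alt tokens
instance (tokens : List String) (out : (List (String × Int)) × (List (String × List (String × Int))) × (List (String × List (String × Int)))) : Decidable (Spec_get_context1 tokens out) := by unfold Spec_get_context1; infer_instance

-- ===== CLAIM (what is proved, stated in full; the proofs are below) =====
def Claim_equal_get_context1 : Prop := ∀ (tokens : List String), Dom_get_context1 tokens → Spec_get_context1 tokens (get_context1 tokens)

-- ===== LEMMAS AND PROOFS =====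

-- the two neighbour-count events, as state transformers
def pvBEv (t b : String) (s : pvSt) : pvSt :=
  if b = "" then s
  else (s.1, s.2.1.insert t ((s.2.1.getD t PySem.Dict.empty).insert b ((s.2.1.getD t PySem.Dict.empty).getD b 0 + 1)), s.2.2)

def pvAEv (t a : String) (s : pvSt) : pvSt :=
  if a = "" then s
  else (s.1, s.2.1, s.2.2.insert t ((s.2.2.getD t PySem.Dict.empty).insert a ((s.2.2.getD t PySem.Dict.empty).getD a 0 + 1)))

-- A's loop as a recursion carrying the previous token
def pvGoA (b : String) (ts : List String) (s : pvSt) : pvSt :=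
  match ts with
  | [] => s
  | t :: ts => pvGoA t ts (pvStepA s (b, t, ts.headD ""))

-- the neighbour events regrouped in A's per-token order
def pvGoE (b : String) (ts : List String) (s : pvSt) : pvSt :=
  match ts with
  | [] => s
  | t :: ts => pvGoE t ts (pvAEv t (ts.headD "") (pvBEv t b s))

-- B's pair loop as a recursion
def pvGoP (ts : List String) (s : pvSt) : pvSt :=
  match ts with
  | [] => s
  | [_] => s
  | t :: u :: ts => pvGoP (u :: ts) (pvStepPair s (t, u))

def pvF (ts : List String) (s : pvSt) : pvSt := ts.foldl pvStepTF s

lemma pvStepA_decomp (s : pvSt) (b t a : String) :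
    pvStepA s (b, t, a) = pvAEv t a (pvBEv t b (pvStepTF s t)) := by
  simp only [pvStepA, pvStepTF, pvBEv, pvAEv]
  split_ifs <;> rfl

lemma pvStepPair_decomp (s : pvSt) (p c : String) :
    pvStepPair s (p, c) = pvBEv c p (pvAEv p c s) := by
  simp only [pvStepPair, pvBEv, pvAEv]
  split_ifs <;> rfl

lemma pvFoldA (ts : List String) (b : String) (s : pvSt) :
    (List.zip (b :: ts) (List.zip ts (ts.tail ++ [""]))).foldl pvStepA s = pvGoA b ts s := by
  induction ts generalizing b s with
  | nil => rfl
  | cons t ts ih =>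
    cases ts with
    | nil => simp [pvGoA, List.zip]
    | cons u r => simpa [pvGoA, List.zip] using ih t (pvStepA s (b, t, u))

lemma pvFoldP (ts : List String) (s : pvSt) :
    (List.zip ts ts.tail).foldl pvStepPair s = pvGoP ts s := by
  induction ts generalizing s with
  | nil => rfl
  | cons t ts ih =>
    cases ts with
    | nil => rfl
    | cons u r => simpa [pvGoP, List.zip] using ih (pvStepPair s (t, u))

lemma pvGoE_eq_goP (ts : List String) (t : String) (s : pvSt) :
    pvGoE t ts (pvAEv t (ts.headD "") s) = pvGoP (t :: ts) s := by
  induction ts generalizing t s with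
  | nil => simp [pvGoE, pvGoP, pvAEv]
  | cons u r ih =>
    show pvGoE u r (pvAEv u (r.headD "") (pvBEv u t (pvAEv t u s))) = _
    rw [ih u (pvBEv u t (pvAEv t u s))]
    simp [pvGoP, pvStepPair_decomp]

lemma pvGoP_eq_goE (ts : List String) (s : pvSt) :
    pvGoP ts s = pvGoE "" ts s := by
  cases ts with
  | nil => rfl
  | cons t ts =>
    rw [← pvGoE_eq_goP]
    show _ = pvGoE t ts (pvAEv t (ts.headD "") (pvBEv t "" s))
    simp [pvBEv]

-- dict-level commutation: overwriting an existing key commutes with any other insert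
lemma pv_insert_comm {ν : Type} (d : PySem.Dict String ν) (k k' : String) (v w : ν)
    (h : d.contains k = true) (hne : k' ≠ k) :
    (d.insert k' w).insert k v = (d.insert k v).insert k' w := by
  apply PySem.Dict.ext
  have hA : (d.insert k' w).contains k = true := by rw [PySem.Dict.contains_insert]; simp [h]
  by_cases hc' : d.contains k' = true
  · have hB : (d.insert k v).contains k' = true := by rw [PySem.Dict.contains_insert]; simp [hc']
    rw [PySem.Dict.items_insert_of_contains _ v hA, PySem.Dict.items_insert_of_contains _ w hc',
        PySem.Dict.items_insert_of_contains _ w hB, PySem.Dict.items_insert_of_contains _ v h,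
        List.map_map, List.map_map]
    refine List.map_congr_left fun p _ => ?_
    by_cases h1 : p.1 = k <;> by_cases h2 : p.1 = k' <;>
      simp [Function.comp, h1, h2, hne, Ne.symm hne]
  · have hc'f : d.contains k' = false := by simpa using hc'
    have hB : (d.insert k v).contains k' = false := by
      rw [PySem.Dict.contains_insert]; simp [hne, hc'f]
    rw [PySem.Dict.items_insert_of_contains _ v hA, PySem.Dict.items_insert_of_not_contains _ w hc'f,
        PySem.Dict.items_insert_of_not_contains _ w hB, PySem.Dict.items_insert_of_contains _ v h,
        List.map_append]
    simp [hne]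

lemma pv_c1 (s : pvSt) (t b t' : String) (h1 : s.1.contains t = true) (h2 : s.2.1.contains t = true) :
    pvStepTF (pvBEv t b s) t' = pvBEv t b (pvStepTF s t') := by
  by_cases hb : b = ""
  · simp [pvBEv, hb]
  · by_cases hc : s.1.contains t' = true
    · simp [pvStepTF, pvBEv, hb, hc]
    · have hne : t' ≠ t := fun e => hc (e ▸ h1)
      have hcf : s.1.contains t' = false := by simpa using hc
      simp only [pvStepTF, pvBEv, if_neg hb, hcf, Bool.false_eq_true, if_false]
      rw [PySem.Dict.getD_insert_of_ne _ _ _ hne.symm]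
      rw [pv_insert_comm _ _ _ _ _ h2 hne]

lemma pv_c2 (s : pvSt) (t a t' : String) (h1 : s.1.contains t = true) (h3 : s.2.2.contains t = true) :
    pvStepTF (pvAEv t a s) t' = pvAEv t a (pvStepTF s t') := by
  by_cases ha : a = ""
  · simp [pvAEv, ha]
  · by_cases hc : s.1.contains t' = true
    · simp [pvStepTF, pvAEv, ha, hc]
    · have hne : t' ≠ t := fun e => hc (e ▸ h1)
      have hcf : s.1.contains t' = false := by simpa using hc
      simp only [pvStepTF, pvAEv, if_neg ha, hcf, Bool.false_eq_true, if_false]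
      rw [PySem.Dict.getD_insert_of_ne _ _ _ hne.symm]
      rw [pv_insert_comm _ _ _ _ _ h3 hne]

lemma pvStepTF_mono (s : pvSt) (t t' : String) :
    (s.1.contains t = true → (pvStepTF s t').1.contains t = true) ∧
    (s.2.1.contains t = true → (pvStepTF s t').2.1.contains t = true) ∧
    (s.2.2.contains t = true → (pvStepTF s t').2.2.contains t = true) := by
  refine ⟨?_, ?_, ?_⟩ <;>
    (simp only [pvStepTF]; split_ifs <;> intro h <;> simp [PySem.Dict.contains_insert, h])

lemma pvC (ts : List String) (t b a : String) (s : pvSt)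
    (h1 : s.1.contains t = true) (h2 : s.2.1.contains t = true) (h3 : s.2.2.contains t = true) :
    pvF ts (pvAEv t a (pvBEv t b s)) = pvAEv t a (pvBEv t b (pvF ts s)) := by
  induction ts generalizing s with
  | nil => rfl
  | cons t' ts ih =>
    show pvF ts (pvStepTF (pvAEv t a (pvBEv t b s)) t') = _
    have hb1 : (pvBEv t b s).1 = s.1 := by simp [pvBEv]; split_ifs <;> rfl
    have hb3 : (pvBEv t b s).2.2 = s.2.2 := by simp [pvBEv]; split_ifs <;> rfl
    rw [pv_c2 _ t a t' (by rw [hb1]; exact h1) (by rw [hb3]; exact h3),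
        pv_c1 _ t b t' h1 h2]
    exact ih (pvStepTF s t') ((pvStepTF_mono s t t').1 h1)
      ((pvStepTF_mono s t t').2.1 h2) ((pvStepTF_mono s t t').2.2 h3)

def pvInv (s : pvSt) : Prop :=
  ∀ k, s.1.contains k = true → s.2.1.contains k = true ∧ s.2.2.contains k = true

lemma pvInv_stepA (s : pvSt) (b t a : String) (h : pvInv s) : pvInv (pvStepA s (b, t, a)) := by
  intro k hk
  have hk2 : k = t ∨ s.1.contains k = true := by
    simp only [pvStepA] at hk
    split_ifs at hk with hct <;> simp [PySem.Dict.contains_insert] at hk <;> tauto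
  rcases hk2 with rfl | hks
  · by_cases hct : s.1.contains k = true
    · obtain ⟨hB, hA⟩ := h k hct
      constructor <;> (simp only [pvStepA]; split_ifs <;> simp [hB, hA])
    · constructor <;> (simp only [pvStepA]; split_ifs <;>
        first
          | exact absurd ‹s.1.contains k = true› hct
          | simp)
  · obtain ⟨hB, hA⟩ := h k hks
    constructor <;> (simp only [pvStepA]; split_ifs <;> simp [PySem.Dict.contains_insert, hB, hA])

lemma pvM (ts : List String) (b : String) (s : pvSt) (h : pvInv s) :
    pvGoA b ts s = pvGoE b ts (pvF ts s) := by
  induction ts generalizing b s with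
  | nil => rfl
  | cons t ts ih =>
    show pvGoA t ts (pvStepA s (b, t, ts.headD "")) = pvGoE t ts (pvAEv t (ts.headD "") (pvBEv t b (pvF ts (pvStepTF s t))))
    rw [ih t _ (pvInv_stepA s b t (ts.headD "") h), pvStepA_decomp]
    congr 1
    have htf : (pvStepTF s t).1.contains t = true := by
      simp [pvStepTF, PySem.Dict.contains_insert_self]
    have hbe : (pvStepTF s t).2.1.contains t = true := by
      simp only [pvStepTF]
      split_ifs with hc
      · exact (h t hc).1
      · simp [PySem.Dict.contains_insert_self]
    have haf : (pvStepTF s t).2.2.contains t = true := by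
      simp only [pvStepTF]
      split_ifs with hc
      · exact (h t hc).2
      · simp [PySem.Dict.contains_insert_self]
    exact pvC ts t b (ts.headD "") (pvStepTF s t) htf hbe haf

-- ===== VERDICT (by name: the statement is the Claim_ definition above) =====
theorem get_context1_spec : Claim_equal_get_context1 := by
  intro tokens _
  unfold Spec_get_context1 get_context1 get_context1_alt
  have hstate :
      (List.zip ([""] ++ tokens) (List.zip tokens (PySem.List.slice tokens (some 1) none ++ [""]))).foldl
          pvStepA (PySem.Dict.empty, PySem.Dict.empty, PySem.Dict.empty)
        = (List.zip tokens (PySem.List.slice tokens (some 1) none)).foldl pvStepPair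
            (tokens.foldl pvStepTF (PySem.Dict.empty, PySem.Dict.empty, PySem.Dict.empty)) := by
    rw [PySem.List.slice_from_one]
    rw [show ([""] ++ tokens) = ("" :: tokens) from rfl, pvFoldA, pvFoldP]
    rw [pvM tokens "" _ (by intro k hk; simp [PySem.Dict.contains_empty] at hk)]
    rw [pvGoP_eq_goE]
    rfl
  rw [hstate]
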